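-- pv_equiv track=rewrite | github.com/frrad/leetweek | 1848.minimum-distance-to-the-target-element.py | getMinDistance
-- ===== SOURCE A (Python) =====
-- from typing import List
--
-- def getMinDistance(nums: List[int], target: int, start: int) -> int:
--     best = len(nums) + 10
--     for i, x in enumerate(nums):
--         if x != target:
--             continue
--         candidate = abs(i - start)
--         if candidate > best:
--             continue
--         best = candidate
--
--     return best
-- ===== SOURCE B (Python) =====
-- def getMinDistance(nums, target, start):
--     n = len(nums)
--     # any match farther than n + 9 can never beat the n + 10 sentinel,
--     # so distances 0 .. n + 9 are the only ones worth probing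
--     for d in range(n + 10):
--         j = start - d
--         if 0 <= j < n and nums[j] == target:
--             return d
--         k = start + d
--         if d > 0 and 0 <= k < n and nums[k] == target:
--             return d
--     return n + 10
-- ===== Notes on version B (the rewrite author's own statement) =====
-- stated objective: alternative
-- what changed: B replaces A's full scan with a running minimum by a bidirectional outward search from start: it probes indices start-d and start+d for d = 0,1,...,len(nums)+9 and returns the first distance that hits target (distances beyond len(nums)+9 can never beat the len(nums)+10 no-match sentinel), returning the sentinel if the search exhausts.
import Mathlib
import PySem

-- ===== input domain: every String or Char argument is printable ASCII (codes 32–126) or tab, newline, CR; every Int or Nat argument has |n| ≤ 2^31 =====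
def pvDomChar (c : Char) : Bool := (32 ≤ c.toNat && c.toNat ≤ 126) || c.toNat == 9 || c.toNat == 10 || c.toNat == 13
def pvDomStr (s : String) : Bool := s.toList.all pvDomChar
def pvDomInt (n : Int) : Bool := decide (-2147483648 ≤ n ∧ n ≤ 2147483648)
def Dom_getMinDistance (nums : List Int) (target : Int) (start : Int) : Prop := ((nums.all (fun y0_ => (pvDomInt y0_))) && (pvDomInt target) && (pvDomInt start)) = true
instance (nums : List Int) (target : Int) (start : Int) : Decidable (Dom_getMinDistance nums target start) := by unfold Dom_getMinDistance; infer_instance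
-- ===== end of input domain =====

-- B searches outward from `start` (indices start-d, start+d for d = 0, 1, ..., len+9) and returns
-- the first distance that hits the target, instead of scanning the whole array with a running
-- minimum; distances beyond len+9 never beat A's len+10 sentinel, so the two agree on every input.

-- ===== PORT A =====
def getMinDistance (nums : List Int) (target : Int) (start : Int) : Int :=
  (PySem.List.enumerate nums 0).foldl
    (fun best p =>
      if p.2 ≠ target then best
      else if |p.1 - start| > best then best
      else |p.1 - start|)
    ((nums.length : Int) + 10)

-- ===== PORT B =====
-- the loop 'for d in range(n + 10)': structural recursion on the remaining iteration count `rem`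
def altGo (nums : List Int) (target : Int) (start : Int) (n : Int) (d : Nat) : Nat → Int
  | 0 => n + 10
  | r + 1 =>
    if 0 ≤ start - (d : Int) ∧ start - (d : Int) < n ∧ PySem.List.pyGet? nums (start - (d : Int)) = some target then (d : Int)
    else if 0 < d ∧ 0 ≤ start + (d : Int) ∧ start + (d : Int) < n ∧ PySem.List.pyGet? nums (start + (d : Int)) = some target then (d : Int)
    else altGo nums target start n (d + 1) r

def getMinDistance_alt (nums : List Int) (target : Int) (start : Int) : Int :=
  altGo nums target start (nums.length : Int) 0 (nums.length + 10)

-- ===== PRECONDITION & SPEC =====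
def Spec_getMinDistance (nums : List Int) (target : Int) (start : Int) (out : Int) : Prop := out = getMinDistance_alt nums target start
instance (nums : List Int) (target : Int) (start : Int) (out : Int) : Decidable (Spec_getMinDistance nums target start out) := by unfold Spec_getMinDistance; infer_instance

-- ===== CLAIM (what is proved, stated in full; the proofs are below) =====
def Claim_equal_getMinDistance : Prop := ∀ (nums : List Int) (target : Int) (start : Int), Dom_getMinDistance nums target start → Spec_getMinDistance nums target start (getMinDistance nums target start)

-- ===== LEMMAS AND PROOFS =====

-- "B's guards fire at distance d"
def QQ (nums : List Int) (target : Int) (start : Int) (d : Nat) : Prop :=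
  (0 ≤ start - (d : Int) ∧ start - (d : Int) < (nums.length : Int) ∧ PySem.List.pyGet? nums (start - (d : Int)) = some target) ∨
  (0 < d ∧ 0 ≤ start + (d : Int) ∧ start + (d : Int) < (nums.length : Int) ∧ PySem.List.pyGet? nums (start + (d : Int)) = some target)

theorem altGo_none (nums : List Int) (target : Int) (start : Int) :
    ∀ (rem d : Nat), (∀ e, d ≤ e → e < d + rem → ¬ QQ nums target start e) →
      altGo nums target start (nums.length : Int) d rem = (nums.length : Int) + 10 := by
  intro rem
  induction rem with
  | zero => intro d _; rfl
  | succ r ih =>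
      intro d hnone
      have hq : ¬ QQ nums target start d := hnone d le_rfl (by omega)
      unfold QQ at hq
      simp only [altGo]
      rw [if_neg (fun h => hq (Or.inl h)), if_neg (fun h => hq (Or.inr h))]
      exact ih (d + 1) (fun e h1 h2 => hnone e (by omega) (by omega))

theorem altGo_least (nums : List Int) (target : Int) (start : Int) :
    ∀ (rem d e : Nat), QQ nums target start e → d ≤ e → e < d + rem →
      (∀ e', d ≤ e' → e' < e → ¬ QQ nums target start e') →
      altGo nums target start (nums.length : Int) d rem = (e : Int) := by
  intro rem
  induction rem with
  | zero => intro d e _ _ h2 _; omega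
  | succ r ih =>
      intro d e hQ hde hlt hmin
      by_cases hd : QQ nums target start d
      · have hed : e = d := by
          by_contra hne
          exact hmin d le_rfl (by omega) hd
        subst hed
        unfold QQ at hQ
        rcases hQ with h | h
        · simp only [altGo]; rw [if_pos h]
        · simp only [altGo]
          by_cases h1 : 0 ≤ start - (e : Int) ∧ start - (e : Int) < (nums.length : Int) ∧ PySem.List.pyGet? nums (start - (e : Int)) = some target
          · rw [if_pos h1]
          · rw [if_neg h1, if_pos h]
      · have hne : e ≠ d := fun h => hd (h ▸ hQ)
        unfold QQ at hd
        simp only [altGo]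
        rw [if_neg (fun h => hd (Or.inl h)), if_neg (fun h => hd (Or.inr h))]
        exact ih (d + 1) e hQ (by omega) (by omega) (fun e' h1 h2 => hmin e' (by omega) h2)

-- QQ d ⟹ a matching index at distance d
theorem qq_to_match (nums : List Int) (target : Int) (start : Int) (d : Nat)
    (h : QQ nums target start d) :
    ∃ (i : Nat) (_ : i < nums.length), nums[i] = target ∧ |(i : Int) - start| = (d : Int) := by
  rcases h with ⟨h0, hn, hget⟩ | ⟨hd, h0, hn, hget⟩
  · rw [PySem.List.pyGet?_of_nonneg _ h0] at hget
    obtain ⟨hlt, he⟩ := List.getElem?_eq_some_iff.mp hget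
    refine ⟨(start - (d : Int)).toNat, hlt, he, ?_⟩
    have hc : (((start - (d : Int)).toNat : Nat) : Int) = start - (d : Int) := Int.toNat_of_nonneg h0
    rw [hc]
    have h1 : start - (d : Int) - start = -(d : Int) := by ring
    rw [h1, abs_neg, abs_of_nonneg (Int.natCast_nonneg d)]
  · rw [PySem.List.pyGet?_of_nonneg _ h0] at hget
    obtain ⟨hlt, he⟩ := List.getElem?_eq_some_iff.mp hget
    refine ⟨(start + (d : Int)).toNat, hlt, he, ?_⟩
    have hc : (((start + (d : Int)).toNat : Nat) : Int) = start + (d : Int) := Int.toNat_of_nonneg h0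
    rw [hc]
    have h1 : start + (d : Int) - start = (d : Int) := by ring
    rw [h1, abs_of_nonneg (Int.natCast_nonneg d)]

-- a matching index at distance |i - start| ⟹ QQ there
theorem match_to_qq (nums : List Int) (target : Int) (start : Int) (i : Nat)
    (hi : i < nums.length) (hx : nums[i] = target) :
    QQ nums target start (|(i : Int) - start|).toNat := by
  unfold QQ
  by_cases hc : (i : Int) ≤ start
  · left
    have hcast : (((|(i : Int) - start|).toNat : Nat) : Int) = start - (i : Int) := by
      rw [Int.toNat_of_nonneg (abs_nonneg _), abs_of_nonpos (by omega : (i : Int) - start ≤ 0)]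
      ring
    refine ⟨by omega, by omega, ?_⟩
    have hsd : start - (((|(i : Int) - start|).toNat : Nat) : Int) = (i : Int) := by omega
    rw [hsd, PySem.List.pyGet?_natCast]
    exact List.getElem?_eq_some_iff.mpr ⟨hi, hx⟩
  · right
    have hcast : (((|(i : Int) - start|).toNat : Nat) : Int) = (i : Int) - start := by
      rw [Int.toNat_of_nonneg (abs_nonneg _), abs_of_nonneg (by omega : (0 : Int) ≤ (i : Int) - start)]
    refine ⟨by omega, by omega, by omega, ?_⟩
    have hsd : start + (((|(i : Int) - start|).toNat : Nat) : Int) = (i : Int) := by omega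
    rw [hsd, PySem.List.pyGet?_natCast]
    exact List.getElem?_eq_some_iff.mpr ⟨hi, hx⟩

-- A's fold never exceeds its initial accumulator
theorem foldA_le_init (target start : Int) :
    ∀ (l : List (Int × Int)) (b : Int),
      l.foldl (fun best p => if p.2 ≠ target then best else if |p.1 - start| > best then best else |p.1 - start|) b ≤ b := by
  intro l
  induction l with
  | nil => intro b; exact le_rfl
  | cons q l ih =>
      intro b
      simp only [List.foldl_cons]
      split_ifs with h1 h2
      · exact ih b
      · exact ih b
      · exact le_trans (ih _) (by omega)

-- A's fold is ≤ the distance of every matching entry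
theorem foldA_le_mem (target start : Int) :
    ∀ (l : List (Int × Int)) (b : Int) (p : Int × Int), p ∈ l → p.2 = target →
      l.foldl (fun best p => if p.2 ≠ target then best else if |p.1 - start| > best then best else |p.1 - start|) b ≤ |p.1 - start| := by
  intro l
  induction l with
  | nil => intro b p h _; exact absurd h (List.not_mem_nil)
  | cons q l ih =>
      intro b p hmem hp
      rcases List.mem_cons.mp hmem with h | h
      · subst h
        simp only [List.foldl_cons]
        split_ifs with h1 h2
        · exact absurd hp h1
        · exact le_trans (foldA_le_init target start l b) (by omega)
        · exact foldA_le_init target start l _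
      · simp only [List.foldl_cons]
        split_ifs with h1 h2
        · exact ih b p h hp
        · exact ih b p h hp
        · exact ih _ p h hp

-- A's fold returns the accumulator or the distance of some matching entry
theorem foldA_cases (target start : Int) :
    ∀ (l : List (Int × Int)) (b : Int),
      (l.foldl (fun best p => if p.2 ≠ target then best else if |p.1 - start| > best then best else |p.1 - start|) b = b) ∨
      (∃ p ∈ l, p.2 = target ∧ l.foldl (fun best p => if p.2 ≠ target then best else if |p.1 - start| > best then best else |p.1 - start|) b = |p.1 - start|) := by
  intro l
  induction l with
  | nil => intro b; exact Or.inl rfl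
  | cons q l ih =>
      intro b
      simp only [List.foldl_cons]
      split_ifs with h1 h2
      · rcases ih b with h | ⟨p, hm, hp, he⟩
        · exact Or.inl h
        · exact Or.inr ⟨p, List.mem_cons_of_mem _ hm, hp, he⟩
      · rcases ih b with h | ⟨p, hm, hp, he⟩
        · exact Or.inl h
        · exact Or.inr ⟨p, List.mem_cons_of_mem _ hm, hp, he⟩
      · rcases ih |q.1 - start| with h | ⟨p, hm, hp, he⟩
        · exact Or.inr ⟨q, by simp, not_ne_iff.mp h1, h⟩
        · exact Or.inr ⟨p, List.mem_cons_of_mem _ hm, hp, he⟩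

-- ===== VERDICT (by name: the statement is the Claim_ definition above) =====
theorem getMinDistance_spec : Claim_equal_getMinDistance := by
  intro nums target start _
  unfold Spec_getMinDistance
  have _hdec : DecidablePred (QQ nums target start) := fun d => by unfold QQ; infer_instance
  by_cases hex : ∃ e, QQ nums target start e
  · have hQ0 : QQ nums target start (Nat.find hex) := Nat.find_spec hex
    have hmin : ∀ e', e' < Nat.find hex → ¬ QQ nums target start e' :=
      fun e' h => Nat.find_min hex h
    obtain ⟨i, hi, hx, hdist⟩ := qq_to_match nums target start (Nat.find hex) hQ0
    have hmem : ((0 : Int) + (i : Nat), target) ∈ PySem.List.enumerate nums 0 := by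
      rw [PySem.List.mem_enumerate_iff]
      exact ⟨i, hi, by rw [hx]⟩
    have hle : getMinDistance nums target start ≤ ((Nat.find hex : Nat) : Int) := by
      have h1 := foldA_le_mem target start (PySem.List.enumerate nums 0)
        ((nums.length : Int) + 10) ((0 : Int) + (i : Nat), target) hmem rfl
      unfold getMinDistance
      calc _ ≤ |(0 : Int) + (i : Nat) - start| := h1
        _ = ((Nat.find hex : Nat) : Int) := by rw [zero_add]; exact hdist
    by_cases hsmall : Nat.find hex < nums.length + 10
    · -- the nearest hit is inside B's search window: both sides return its distance
      have hB : getMinDistance_alt nums target start = ((Nat.find hex : Nat) : Int) := by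
        unfold getMinDistance_alt
        exact altGo_least nums target start (nums.length + 10) 0 (Nat.find hex) hQ0 (Nat.zero_le _)
          (by omega) (fun e' _ h2 => hmin e' h2)
      have hge : ((Nat.find hex : Nat) : Int) ≤ getMinDistance nums target start := by
        rcases foldA_cases target start (PySem.List.enumerate nums 0) ((nums.length : Int) + 10) with h | ⟨p, hm, hp, he⟩
        · have hA : getMinDistance nums target start = (nums.length : Int) + 10 := h
          omega
        · rw [PySem.List.mem_enumerate_iff] at hm
          obtain ⟨k, hk, hpk⟩ := hm
          have hq := match_to_qq nums target start k hk (by rw [hpk] at hp; exact hp)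
          have hfind := Nat.find_min' hex hq
          have hcast : (((|(k : Int) - start|).toNat : Nat) : Int) = |(k : Int) - start| :=
            Int.toNat_of_nonneg (abs_nonneg _)
          have hres : getMinDistance nums target start = |(k : Int) - start| := by
            have hp1 : p.1 = (0 : Int) + (k : Nat) := by rw [hpk]
            unfold getMinDistance
            rw [he, hp1, zero_add]
          omega
      rw [hB]
      omega
    · -- the nearest hit lies beyond the window: B exhausts it and A's sentinel caps the minimum
      have hB : getMinDistance_alt nums target start = (nums.length : Int) + 10 := by
        unfold getMinDistance_alt
        exact altGo_none nums target start (nums.length + 10) 0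
          (fun e _ h2 => hmin e (by omega))
      have hA : getMinDistance nums target start = (nums.length : Int) + 10 := by
        have hA_le : getMinDistance nums target start ≤ (nums.length : Int) + 10 :=
          foldA_le_init target start (PySem.List.enumerate nums 0) ((nums.length : Int) + 10)
        rcases foldA_cases target start (PySem.List.enumerate nums 0) ((nums.length : Int) + 10) with h | ⟨p, hm, hp, he⟩
        · exact h
        · rw [PySem.List.mem_enumerate_iff] at hm
          obtain ⟨k, hk, hpk⟩ := hm
          have hq := match_to_qq nums target start k hk (by rw [hpk] at hp; exact hp)
          have hfind := Nat.find_min' hex hq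
          have hcast : (((|(k : Int) - start|).toNat : Nat) : Int) = |(k : Int) - start| :=
            Int.toNat_of_nonneg (abs_nonneg _)
          have hres : getMinDistance nums target start = |(k : Int) - start| := by
            have hp1 : p.1 = (0 : Int) + (k : Nat) := by rw [hpk]
            unfold getMinDistance
            rw [he, hp1, zero_add]
          omega
      rw [hA, hB]
  · have hB : getMinDistance_alt nums target start = (nums.length : Int) + 10 := by
      unfold getMinDistance_alt
      exact altGo_none nums target start (nums.length + 10) 0 (fun e _ _ he => hex ⟨e, he⟩)
    have hA : getMinDistance nums target start = (nums.length : Int) + 10 := by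
      rcases foldA_cases target start (PySem.List.enumerate nums 0) ((nums.length : Int) + 10) with h | ⟨p, hm, hp, he⟩
      · exact h
      · exfalso
        rw [PySem.List.mem_enumerate_iff] at hm
        obtain ⟨k, hk, hpk⟩ := hm
        exact hex ⟨_, match_to_qq nums target start k hk (by rw [hpk] at hp; exact hp)⟩
    rw [hA, hB]
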